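-- pv_equiv track=rewrite | github.com/aollio/toys | leet_code/6_zigzag_conversion.py | strangely_series
-- ===== SOURCE A (Python) =====
-- def strangely_series(n, length):
--     """
--     generate series like 0 1 2 3 2 1 0 1 2 3 ... (n = 4)
--     """
--     if n == 1:
--         return [0] * length
--     series = [0]
--     up = True
--     for index in range(1, length):
--         pre = series[-1]
--         if up:
--             if pre == n - 1:
--                 series.append(pre - 1)
--                 up = False
--             else:
--                 series.append(pre + 1)
--         else:
--             if pre == 0:
--                 series.append(pre + 1)
--                 up = True
--             else:
--                 series.append(pre - 1)
--     return series
-- ===== SOURCE B (Python) =====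
-- def strangely_series(n, length):
--     """
--     generate series like 0 1 2 3 2 1 0 1 2 3 ... (n = 4)
--     """
--     if n == 1:
--         return [0] * length
--     period = 2 * (n - 1)
--     series = [0]
--     for i in range(1, length):
--         m = i % period
--         series.append(m if m <= n - 1 else period - m)
--     return series
-- ===== Notes on version B (the rewrite author's own statement) =====
-- stated objective: simpler
-- what changed: Replaces the stateful up/down-flag walk that inspects the previous element with a closed-form triangle-wave formula (m = i % (2n-2), folded back past n-1) computed independently for each index.
-- outside the precondition, e.g. on strangely_series(0, 3): A returns [0, 1, 2], B returns [0, -1, -2]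
import Mathlib
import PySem

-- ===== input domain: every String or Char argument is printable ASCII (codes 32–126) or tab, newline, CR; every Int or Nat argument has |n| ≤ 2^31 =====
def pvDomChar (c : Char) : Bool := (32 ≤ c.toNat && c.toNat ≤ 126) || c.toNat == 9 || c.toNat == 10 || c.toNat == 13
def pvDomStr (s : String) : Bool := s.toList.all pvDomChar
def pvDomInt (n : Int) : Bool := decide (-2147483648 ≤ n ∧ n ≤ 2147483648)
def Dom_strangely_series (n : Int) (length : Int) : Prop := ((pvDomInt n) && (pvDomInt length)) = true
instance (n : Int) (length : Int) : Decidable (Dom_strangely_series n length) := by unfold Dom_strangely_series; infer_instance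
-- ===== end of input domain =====

-- B replaces A's stateful up/down-flag walk by a closed-form triangle-wave formula per index (simpler).


-- ===== PORT A =====
-- literal port of A: [0]*length for n==1; otherwise a fold over range(1, length)
-- carrying (series, up); series[-1] is pyGet? at -1 (series is never empty, so .getD 0 never fires)
def strangely_series (n : Int) (length : Int) : List Int :=
  if n = 1 then List.replicate length.toNat 0
  else
    ((PySem.List.pyRange 1 length 1).foldl
      (fun (st : List Int × Bool) _index =>
        let series := st.1
        let up := st.2
        let pre := (PySem.List.pyGet? series (-1)).getD 0
        if up then
          if pre = n - 1 then (series ++ [pre - 1], false)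
          else (series ++ [pre + 1], true)
        else
          if pre = 0 then (series ++ [pre + 1], true)
          else (series ++ [pre - 1], false))
      ([0], true)).1

-- ===== PORT B =====
-- literal port of B: closed-form triangle wave, one value per index, no flag and no lookback
def strangely_series_alt (n : Int) (length : Int) : List Int :=
  if n = 1 then List.replicate length.toNat 0
  else
    let period := 2 * (n - 1)
    (PySem.List.pyRange 1 length 1).foldl
      (fun series i =>
        let m := PySem.Int.mod i period
        series ++ [if m ≤ n - 1 then m else period - m]) [0]

-- ===== PRECONDITION & SPEC =====
-- Pre_ excludes n ≤ 0 with length ≥ 2, outside the function's natural domain (n is the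
-- number of zigzag levels, so n ≥ 1): no zigzag series of n levels is specified there, and
-- the two implementations choose differently (A's flag never flips, B's modulus is negative).
def Pre_strangely_series (n : Int) (length : Int) : Prop := 1 ≤ n ∨ length ≤ 1
instance (n : Int) (length : Int) : Decidable (Pre_strangely_series n length) := by unfold Pre_strangely_series; infer_instance
def pvWitness_strangely_series : Int × Int := (4, 10)
def Spec_strangely_series (n : Int) (length : Int) (out : List Int) : Prop := out = strangely_series_alt n length
instance (n : Int) (length : Int) (out : List Int) : Decidable (Spec_strangely_series n length out) := by unfold Spec_strangely_series; infer_instance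

-- ===== CLAIM (what is proved, stated in full; the proofs are below) =====
def Claim_equal_strangely_series : Prop := ∀ (n : Int) (length : Int), Dom_strangely_series n length → Pre_strangely_series n length → Spec_strangely_series n length (strangely_series n length)

-- ===== LEMMAS AND PROOFS =====

-- closed-form value of the wave at index i (matches B's per-index formula)
def triW (n i : Int) : Int :=
  let m := PySem.Int.mod i (2 * (n - 1))
  if m ≤ n - 1 then m else 2 * (n - 1) - m

-- characterisation of A's "up" flag after processing index k
def upW (n : Int) (k : Nat) : Bool :=
  decide ((1 ≤ (k : Int) % (2 * (n - 1)) ∧ (k : Int) % (2 * (n - 1)) ≤ n - 1) ∨ k = 0)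

-- the step function of A's loop, named for the lemmas (identical to the lambda in the port)
def stepA (n : Int) (st : List Int × Bool) (_index : Int) : List Int × Bool :=
  let series := st.1
  let up := st.2
  let pre := (PySem.List.pyGet? series (-1)).getD 0
  if up then
    if pre = n - 1 then (series ++ [pre - 1], false)
    else (series ++ [pre + 1], true)
  else
    if pre = 0 then (series ++ [pre + 1], true)
    else (series ++ [pre - 1], false)

theorem triW_zero (n : Int) (hn : 2 ≤ n) : triW n 0 = 0 := by
  have hp : (0:Int) < 2 * (n - 1) := by omega
  have h0 : PySem.Int.mod 0 (2 * (n - 1)) = (0:Int) % (2 * (n - 1)) :=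
    PySem.Int.mod_eq_emod_of_pos hp
  simp only [triW, h0, Int.zero_emod]
  rw [if_pos (by omega)]

theorem A_fold_eq (n L : Int) (h1 : n ≠ 1) :
    strangely_series n L = ((PySem.List.pyRange 1 L 1).foldl (stepA n) ([0], true)).1 := by
  simp only [strangely_series, if_neg h1]
  rfl

theorem B_fold_eq (n L : Int) (h1 : n ≠ 1) :
    strangely_series_alt n L = [0] ++ (PySem.List.pyRange 1 L 1).map (triW n) := by
  simp only [strangely_series_alt, if_neg h1]
  rw [PySem.List.foldl_append_singleton_eq_map]
  rfl

-- one arithmetic step: from (…, last = triW n j, flag = upW n j) the loop body appends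
-- triW n (j+1) and sets the flag to upW n (j+1)
theorem stepA_correct (n : Int) (hn : 2 ≤ n) (j : Nat) (series : List Int)
    (hlast : series.getLast? = some (triW n (j : Int))) :
    stepA n (series, upW n j) ((j : Int) + 1)
      = (series ++ [triW n ((j : Int) + 1)], upW n (j + 1)) := by
  have hp : (0:Int) < 2 * (n - 1) := by omega
  have hmeq : PySem.Int.mod ((j:Int)) (2*(n-1)) = (j:Int) % (2*(n-1)) :=
    PySem.Int.mod_eq_emod_of_pos hp
  obtain ⟨m, hmdef⟩ : ∃ m, (j:Int) % (2*(n-1)) = m := ⟨_, rfl⟩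
  have hm0 : 0 ≤ m := hmdef ▸ Int.emod_nonneg _ (by omega)
  have hmlt : m < 2*(n-1) := hmdef ▸ Int.emod_lt_of_pos _ hp
  have h1p : (1:Int) % (2*(n-1)) = 1 := Int.emod_eq_of_lt (by omega) (by omega)
  have hm'' : ((j:Int)+1) % (2*(n-1)) = if m + 1 = 2*(n-1) then 0 else m + 1 := by
    rw [Int.add_emod, h1p, hmdef]
    split
    · next h => rw [h]; exact Int.emod_self
    · exact Int.emod_eq_of_lt (by omega) (by omega)
  have hmeq1 : PySem.Int.mod ((j:Int)+1) (2*(n-1)) = ((j:Int)+1) % (2*(n-1)) :=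
    PySem.Int.mod_eq_emod_of_pos hp
  have htrij : triW n (j:Int) = if m ≤ n - 1 then m else 2*(n-1) - m := by
    simp only [triW, hmeq, hmdef]
  have htrij1 : triW n ((j:Int)+1)
      = (if (if m + 1 = 2*(n-1) then (0:Int) else m + 1) ≤ n - 1
         then (if m + 1 = 2*(n-1) then (0:Int) else m + 1)
         else 2*(n-1) - (if m + 1 = 2*(n-1) then (0:Int) else m + 1)) := by
    simp only [triW, hmeq1, hm'']
  have hupj : upW n j = decide ((1 ≤ m ∧ m ≤ n - 1) ∨ j = 0) := by
    simp only [upW, hmdef]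
  have hupj1 : upW n (j+1)
      = decide ((1 ≤ (if m + 1 = 2*(n-1) then (0:Int) else m + 1)
                 ∧ (if m + 1 = 2*(n-1) then (0:Int) else m + 1) ≤ n - 1) ∨ j + 1 = 0) := by
    simp only [upW, Nat.cast_add, Nat.cast_one, hm'']
  have hj0m : j = 0 → m = 0 := by
    intro h
    subst h
    simpa using hmdef.symm
  by_cases hup : (1 ≤ m ∧ m ≤ n - 1) ∨ j = 0
  · have hmle : m ≤ n - 1 := by
      rcases hup with h | h
      · omega
      · have := hj0m h; omega
    have hupT : upW n j = true := by rw [hupj]; exact decide_eq_true hup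
    have hpre : triW n (j:Int) = m := by rw [htrij, if_pos hmle]
    by_cases hmn : m = n - 1
    · have hv : triW n ((j:Int)+1) = m - 1 := by
        rw [htrij1]; split_ifs <;> omega
      have hb : upW n (j+1) = false := by
        rw [hupj1, decide_eq_false_iff_not]
        split_ifs <;> simp <;> omega
      simp [stepA, hupT, PySem.List.pyGet?_neg_one, hlast, hpre, hmn, hv, hb]
    · have hv : triW n ((j:Int)+1) = m + 1 := by
        rw [htrij1]; split_ifs <;> omega
      have hb : upW n (j+1) = true := by
        rw [hupj1, decide_eq_true_eq]
        left
        split_ifs <;> omega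
      simp [stepA, hupT, PySem.List.pyGet?_neg_one, hlast, hpre, hmn, hv, hb]
  · have hj : j ≠ 0 := fun h => hup (Or.inr h)
    have hnflag : ¬ (1 ≤ m ∧ m ≤ n - 1) := fun h => hup (Or.inl h)
    have hupF : upW n j = false := by
      rw [hupj, decide_eq_false_iff_not]
      exact hup
    by_cases hmz : m = 0
    · have hpre : triW n (j:Int) = 0 := by rw [htrij, if_pos (by omega)]; omega
      have hv : triW n ((j:Int)+1) = 1 := by
        rw [htrij1]; split_ifs <;> omega
      have hb : upW n (j+1) = true := by
        rw [hupj1, decide_eq_true_eq]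
        left
        split_ifs <;> omega
      simp only [stepA, hupF, PySem.List.pyGet?_neg_one, hlast, Option.getD_some, hpre]
      norm_num [hv, hb]
    · have hmgt : n - 1 < m := by omega
      have hpre : triW n (j:Int) = 2*(n-1) - m := by rw [htrij, if_neg (by omega)]
      have hpre0 : ¬ (2*(n-1) - m = 0) := by omega
      have hv : triW n ((j:Int)+1) = 2*(n-1) - m - 1 := by
        rw [htrij1]; split_ifs <;> omega
      have hb : upW n (j+1) = false := by
        rw [hupj1, decide_eq_false_iff_not]
        split_ifs <;> simp <;> omega
      simp only [stepA, hupF, PySem.List.pyGet?_neg_one, hlast, Option.getD_some, hpre]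
      norm_num [hpre0, hv, hb]

-- loop invariant for A: after the indices 1 .. j the state is the mapped closed form plus the flag
theorem A_inv (n : Int) (hn : 2 ≤ n) (j : Nat) :
    (PySem.List.pyRange 1 ((j : Int) + 1) 1).foldl (stepA n) ([0], true)
      = ((PySem.List.pyRange 0 ((j : Int) + 1) 1).map (triW n), upW n j) := by
  induction j with
  | zero =>
      have h1 : PySem.List.pyRange 1 ((0:Nat) + 1 : Int) 1 = [] :=
        PySem.List.pyRange_one_eq_nil (by norm_num)
      have h2 : PySem.List.pyRange 0 ((0:Nat) + 1 : Int) 1 = [(0:Int)] := by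
        rw [PySem.List.pyRange_one_cons (by norm_num)]
        rw [PySem.List.pyRange_one_eq_nil (by norm_num)]
      rw [h1, h2]
      simp [List.foldl, triW_zero n hn, upW]
  | succ k ih =>
      have hk1 : ((k + 1 : Nat) : Int) = (k : Int) + 1 := by push_cast; ring
      have hsplit : PySem.List.pyRange 1 (((k+1 : Nat) : Int) + 1) 1
          = PySem.List.pyRange 1 ((k : Int) + 1) 1 ++ [(k : Int) + 1] := by
        rw [hk1, PySem.List.pyRange_one_succ_right (by omega)]
      have hsplit0 : PySem.List.pyRange 0 (((k+1 : Nat) : Int) + 1) 1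
          = PySem.List.pyRange 0 ((k : Int) + 1) 1 ++ [(k : Int) + 1] := by
        rw [hk1, PySem.List.pyRange_one_succ_right (by omega)]
      have hlast : ((PySem.List.pyRange 0 ((k : Int) + 1) 1).map (triW n)).getLast?
          = some (triW n (k : Int)) := by
        rw [PySem.List.pyRange_one_succ_right (by omega : (0:Int) ≤ (k : Int)), List.map_append]
        simp
      rw [hsplit, List.foldl_append, ih]
      simp only [List.foldl]
      rw [stepA_correct n hn k _ hlast, hsplit0, List.map_append]
      simp

-- ===== VERDICT (by name: the statement is the Claim_ definition above) =====
theorem strangely_series_spec : Claim_equal_strangely_series := by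
  intro n length _hdom hpre
  unfold Spec_strangely_series
  by_cases h1 : n = 1
  · simp [strangely_series, strangely_series_alt, h1]
  · rw [A_fold_eq n length h1, B_fold_eq n length h1]
    by_cases hL : length ≤ 1
    · rw [PySem.List.pyRange_one_eq_nil hL]
      simp
    · have hn : 2 ≤ n := by
        rcases hpre with h | h
        · omega
        · omega
      have hlen : length = (((length - 1).toNat : Nat) : Int) + 1 := by omega
      rw [hlen, A_inv n hn (length - 1).toNat]
      rw [PySem.List.pyRange_one_cons
        (by positivity : (0:Int) < (((length - 1).toNat : Nat) : Int) + 1)]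
      simp [triW_zero n hn]
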